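-- pv_equiv track=rewrite | github.com/sunilgotame/statementgenerator | statement_generator/generator.py | _max_run_length
-- ===== SOURCE A (Python) =====
-- from typing import Literal
--
-- EventType = Literal["deposit", "withdrawal"]
--
-- def _max_run_length(sequence: list[EventType], event_type: EventType) -> int:
--     longest = 0
--     current = 0
--     for item in sequence:
--         if item == event_type:
--             current += 1
--             longest = max(longest, current)
--         else:
--             current = 0
--     return longest
-- ===== SOURCE B (Python) =====
-- from itertools import groupby
--
-- def _max_run_length(sequence, event_type):
--     return max((sum(1 for _ in g) for key, g in groupby(sequence) if key == event_type), default=0)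
-- ===== Notes on version B (the rewrite author's own statement) =====
-- stated objective: idiomatic
-- what changed: Replaced the running counter/reset loop with itertools.groupby run segmentation followed by a max over the lengths of the runs whose key equals event_type.
import Mathlib
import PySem

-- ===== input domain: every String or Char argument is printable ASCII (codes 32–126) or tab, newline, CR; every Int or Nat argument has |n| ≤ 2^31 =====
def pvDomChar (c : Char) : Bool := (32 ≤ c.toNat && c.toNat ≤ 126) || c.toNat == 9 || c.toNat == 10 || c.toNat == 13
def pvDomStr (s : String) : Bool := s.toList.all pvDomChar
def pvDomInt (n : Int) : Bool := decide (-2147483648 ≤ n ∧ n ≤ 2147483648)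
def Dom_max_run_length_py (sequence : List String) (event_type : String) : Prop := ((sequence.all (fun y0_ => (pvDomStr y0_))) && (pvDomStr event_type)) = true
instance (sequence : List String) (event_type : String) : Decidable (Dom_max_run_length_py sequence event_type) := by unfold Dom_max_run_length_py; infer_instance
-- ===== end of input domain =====

-- B replaces A's running-counter/reset loop by groupby-style run segmentation plus a max over matching runs (idiomatic; same cost).


-- ===== PORT A =====
-- literal port of A: fold over the sequence carrying (longest, current)
def max_run_length_py (sequence : List String) (event_type : String) : Int :=
  (sequence.foldl (fun (st : Int × Int) item =>
      if item = event_type then (max st.1 (st.2 + 1), st.2 + 1) else (st.1, 0))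
    (0, 0)).1

-- ===== PORT B =====
-- itertools.groupby: split into maximal runs, as (key, run length) pairs
def pvGroupRuns : List String → List (String × Int)
  | [] => []
  | x :: xs =>
      (x, 1 + ((xs.takeWhile (fun y => y = x)).length : Int)) ::
        pvGroupRuns (xs.dropWhile (fun y => y = x))
termination_by l => l.length
decreasing_by
  have := List.length_dropWhile_le (fun y => y = x) xs
  simp; omega

-- max(... , default=0) over the lengths of the runs whose key matches
def max_run_length_py_alt (sequence : List String) (event_type : String) : Int :=
  ((pvGroupRuns sequence).filter (fun kc => kc.1 = event_type)).foldl
    (fun m kc => max m kc.2) 0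

-- ===== PRECONDITION & SPEC =====
def Spec_max_run_length_py (sequence : List String) (event_type : String) (out : Int) : Prop := out = max_run_length_py_alt sequence event_type
instance (sequence : List String) (event_type : String) (out : Int) : Decidable (Spec_max_run_length_py sequence event_type out) := by unfold Spec_max_run_length_py; infer_instance

-- ===== CLAIM (what is proved, stated in full; the proofs are below) =====
def Claim_equal_max_run_length_py : Prop := ∀ (sequence : List String) (event_type : String), Dom_max_run_length_py sequence event_type → Spec_max_run_length_py sequence event_type (max_run_length_py sequence event_type)

-- ===== LEMMAS AND PROOFS =====

-- A's loop, as explicit recursion on the list with state (longest, current)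
def pvAGo (e : String) : List String → Int × Int → Int
  | [], st => st.1
  | x :: xs, st =>
      pvAGo e xs (if x = e then (max st.1 (st.2 + 1), st.2 + 1) else (st.1, 0))

theorem pvAGo_eq_foldl (e : String) (s : List String) (st : Int × Int) :
    (s.foldl (fun (st : Int × Int) item =>
        if item = e then (max st.1 (st.2 + 1), st.2 + 1) else (st.1, 0)) st).1
      = pvAGo e s st := by
  induction s generalizing st with
  | nil => rfl
  | cons x xs ih => simp [pvAGo, List.foldl, ih]

-- the accumulated longest factors out of A's loop
theorem pvAGo_max (e : String) (s : List String) :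
    ∀ (l c : Int), 0 ≤ l → 0 ≤ c → pvAGo e s (l, c) = max l (pvAGo e s (0, c)) := by
  induction s with
  | nil => intro l c hl _; simp [pvAGo]; omega
  | cons x xs ih =>
      intro l c hl hc
      by_cases hx : x = e
      · simp only [pvAGo, if_pos hx]
        rw [ih (max l (c + 1)) (c + 1) (by omega) (by omega),
            ih (max 0 (c + 1)) (c + 1) (by omega) (by omega)]
        omega
      · simp only [pvAGo, if_neg hx]
        rw [ih l 0 hl le_rfl]

-- a run of elements equal to e advances the counter by its length
theorem pvAGo_run_eq (e : String) (r : List String) :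
    ∀ (t : List String) (l c : Int), (∀ x ∈ r, x = e) → c ≤ l →
      pvAGo e (r ++ t) (l, c) = pvAGo e t (max l (c + r.length), c + r.length) := by
  induction r with
  | nil =>
      intro t l c _ hcl
      simp only [List.nil_append, List.length_nil, Nat.cast_zero, add_zero, max_eq_left hcl]
  | cons y r' ih =>
      intro t l c hall hcl
      have hy : y = e := hall y (by simp)
      simp only [List.cons_append, pvAGo, if_pos hy]
      rw [ih t (max l (c + 1)) (c + 1) (fun x hx => hall x (by simp [hx])) (le_max_right _ _)]
      congr 1
      simp only [List.length_cons, Prod.mk.injEq]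
      push_cast
      have h1 : (0:Int) ≤ (r'.length : Int) := Int.natCast_nonneg _
      constructor <;> omega

-- a run of elements different from e leaves a reset state reset
theorem pvAGo_run_ne (e : String) (r : List String) :
    ∀ (t : List String) (l : Int), (∀ x ∈ r, x ≠ e) →
      pvAGo e (r ++ t) (l, 0) = pvAGo e t (l, 0) := by
  induction r with
  | nil => intro t l _; rfl
  | cons y r' ih =>
      intro t l hall
      have hy : y ≠ e := hall y (by simp)
      simp only [List.cons_append, pvAGo, if_neg hy]
      exact ih t l (fun x hx => hall x (by simp [hx]))

-- if the list does not start with e, the leftover counter is irrelevant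
theorem pvAGo_reset (e : String) (t : List String) (c : Int)
    (h : ∀ y ∈ t.head?, y ≠ e) : pvAGo e t (0, c) = pvAGo e t (0, 0) := by
  cases t with
  | nil => rfl
  | cons y ys =>
      have hy : y ≠ e := h y rfl
      simp [pvAGo, if_neg hy]

-- the accumulator of B's max-fold factors out
theorem pvBFold_max (l : List (String × Int)) :
    ∀ a : Int, 0 ≤ a → l.foldl (fun m kc => max m kc.2) a
      = max a (l.foldl (fun m kc => max m kc.2) 0) := by
  induction l with
  | nil => intro a ha; simp; omega
  | cons kc l' ih =>
      intro a ha
      simp only [List.foldl]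
      rw [ih (max a kc.2) (by omega), ih (max 0 kc.2) (by omega)]
      omega

theorem pv_main (e : String) (s : List String) :
    pvAGo e s (0, 0) = max_run_length_py_alt s e := by
  induction s using pvGroupRuns.induct with
  | case1 => simp [pvAGo, max_run_length_py_alt, pvGroupRuns]
  | case2 x xs ih =>
      have hsplit : xs = xs.takeWhile (fun y => y = x) ++ xs.dropWhile (fun y => y = x) :=
        (List.takeWhile_append_dropWhile).symm
      have htake : ∀ y ∈ xs.takeWhile (fun y => y = x), y = x := by
        intro y hy
        have := List.mem_takeWhile_imp hy
        simpa using this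
      have hdrop : ∀ y ∈ (xs.dropWhile (fun y => y = x)).head?, y ≠ x := by
        intro y hy
        cases hh : (xs.dropWhile (fun y => y = x)).head? with
        | none => simp [hh] at hy
        | some z =>
            simp only [hh, Option.mem_def, Option.some.injEq] at hy
            subst hy
            have hz := List.head?_dropWhile_not (fun y => decide (y = x)) xs
            simp only [hh] at hz
            simpa using hz
      have hlen : (0:Int) ≤ ((xs.takeWhile (fun y => y = x)).length : Int) := Int.natCast_nonneg _
      by_cases hx : x = e
      · subst hx
        -- A side
        have hA : pvAGo x (x :: xs) (0, 0)
            = max (1 + ((xs.takeWhile (fun y => y = x)).length : Int))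
                  (pvAGo x (xs.dropWhile (fun y => y = x)) (0, 0)) := by
          simp only [pvAGo, if_true]
          conv_lhs => rw [hsplit]
          rw [pvAGo_run_eq x _ _ (max 0 (0+1)) (0+1) htake (by omega)]
          rw [pvAGo_max x _ _ _ (by omega) (by omega)]
          rw [pvAGo_reset x _ _ (fun y hy => hdrop y hy)]
          omega
        -- B side
        have hB : max_run_length_py_alt (x :: xs) x
            = max (1 + ((xs.takeWhile (fun y => y = x)).length : Int))
                  (max_run_length_py_alt (xs.dropWhile (fun y => y = x)) x) := by
          unfold max_run_length_py_alt
          rw [pvGroupRuns]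
          rw [List.filter_cons_of_pos (by simp)]
          simp only [List.foldl]
          rw [pvBFold_max _ _ (by omega)]
          omega
        rw [hA, hB, ih]
      · -- head run key is not e
        have hA : pvAGo e (x :: xs) (0, 0)
            = pvAGo e (xs.dropWhile (fun y => y = x)) (0, 0) := by
          simp only [pvAGo, if_neg hx]
          conv_lhs => rw [hsplit]
          exact pvAGo_run_ne e _ _ 0 (fun y hy => by rw [htake y hy]; exact hx)
        have hB : max_run_length_py_alt (x :: xs) e
            = max_run_length_py_alt (xs.dropWhile (fun y => y = x)) e := by
          unfold max_run_length_py_alt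
          rw [pvGroupRuns]
          rw [List.filter_cons_of_neg (by simpa using hx)]
        rw [hA, hB, ih]

-- ===== VERDICT (by name: the statement is the Claim_ definition above) =====
theorem max_run_length_py_spec : Claim_equal_max_run_length_py := by
  intro s e _
  unfold Spec_max_run_length_py max_run_length_py
  rw [pvAGo_eq_foldl, pv_main]
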